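-- pv_equiv track=rewrite | github.com/paiml/depyler | examples/hard_final_conc_atomic.py | simulate_counter
-- ===== SOURCE A (Python) =====
-- def atomic_fetch_add(state: list[int], idx: int, delta: int) -> int:
--     """Fetch-and-add. Returns old value."""
--     old: int = state[idx]
--     state[idx] = old + delta
--     return old
--
-- def simulate_counter(num_threads: int, increments_per: int) -> int:
--     """Simulate concurrent counter increments. Returns final count."""
--     state: list[int] = [0]
--     tid: int = 0
--     while tid < num_threads:
--         inc: int = 0
--         while inc < increments_per:
--             atomic_fetch_add(state, 0, 1)
--             inc = inc + 1
--         tid = tid + 1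
--     return state[0]
-- ===== SOURCE B (Python) =====
-- def simulate_counter(num_threads: int, increments_per: int) -> int:
--     """Simulate concurrent counter increments. Returns final count (closed form)."""
--     if num_threads > 0 and increments_per > 0:
--         return num_threads * increments_per
--     return 0
-- ===== Notes on version B (the rewrite author's own statement) =====
-- stated objective: faster
-- what changed: Replaced the nested increment loops with the closed form num_threads*increments_per (0 if either is non-positive).
import Mathlib
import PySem

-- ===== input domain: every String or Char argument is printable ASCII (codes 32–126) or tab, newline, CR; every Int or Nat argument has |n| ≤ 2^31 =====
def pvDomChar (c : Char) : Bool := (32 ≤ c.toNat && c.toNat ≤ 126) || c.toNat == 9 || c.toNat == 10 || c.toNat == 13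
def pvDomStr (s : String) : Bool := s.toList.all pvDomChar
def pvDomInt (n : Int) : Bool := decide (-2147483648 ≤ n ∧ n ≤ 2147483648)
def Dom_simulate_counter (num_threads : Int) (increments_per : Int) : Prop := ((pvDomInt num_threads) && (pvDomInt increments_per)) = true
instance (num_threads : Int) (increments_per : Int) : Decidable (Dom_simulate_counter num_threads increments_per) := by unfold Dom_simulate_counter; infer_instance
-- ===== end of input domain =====

-- B replaces A's nested increment loops with the closed form num_threads*increments_per (0 if either is non-positive): asymptotically faster.

-- ===== PORT A =====
-- atomic_fetch_add mutates state[0] by delta; the port threads the single-cell state value.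
-- inner while loop: while inc < increments_per: state[0] += 1; inc += 1
def pyInnerLoop (inc : Int) (increments_per : Int) (state : Int) : Int :=
  if inc < increments_per then pyInnerLoop (inc + 1) increments_per (state + 1) else state
termination_by (increments_per - inc).toNat
decreasing_by omega

-- outer while loop over tid
def pyOuterLoop (tid : Int) (num_threads : Int) (increments_per : Int) (state : Int) : Int :=
  if tid < num_threads then
    pyOuterLoop (tid + 1) num_threads increments_per (pyInnerLoop 0 increments_per state)
  else state
termination_by (num_threads - tid).toNat
decreasing_by omega

def simulate_counter (num_threads : Int) (increments_per : Int) : Int :=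
  pyOuterLoop 0 num_threads increments_per 0

-- ===== PORT B =====
def simulate_counter_alt (num_threads : Int) (increments_per : Int) : Int :=
  if num_threads > 0 ∧ increments_per > 0 then num_threads * increments_per else 0

-- ===== PRECONDITION & SPEC =====
def Spec_simulate_counter (num_threads : Int) (increments_per : Int) (out : Int) : Prop := out = simulate_counter_alt num_threads increments_per
instance (num_threads : Int) (increments_per : Int) (out : Int) : Decidable (Spec_simulate_counter num_threads increments_per out) := by unfold Spec_simulate_counter; infer_instance

-- ===== CLAIM (what is proved, stated in full; the proofs are below) =====
def Claim_equal_simulate_counter : Prop := ∀ (num_threads : Int) (increments_per : Int), Dom_simulate_counter num_threads increments_per → Spec_simulate_counter num_threads increments_per (simulate_counter num_threads increments_per)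

-- ===== LEMMAS AND PROOFS =====
theorem pyInnerLoop_eq (inc increments_per state : Int) :
    pyInnerLoop inc increments_per state = state + max (increments_per - inc) 0 := by
  by_cases h : inc < increments_per
  · have : (increments_per - (inc + 1)).toNat < (increments_per - inc).toNat := by omega
    rw [pyInnerLoop, if_pos h, pyInnerLoop_eq (inc + 1) increments_per (state + 1)]
    omega
  · rw [pyInnerLoop, if_neg h]; omega
termination_by (increments_per - inc).toNat
decreasing_by omega

theorem pyOuterLoop_eq (tid num_threads increments_per state : Int) :
    pyOuterLoop tid num_threads increments_per state
      = state + max (num_threads - tid) 0 * max increments_per 0 := by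
  by_cases h : tid < num_threads
  · rw [pyOuterLoop, if_pos h,
      pyOuterLoop_eq (tid + 1) num_threads increments_per _, pyInnerLoop_eq]
    have : max (num_threads - tid) 0 = max (num_threads - (tid + 1)) 0 + 1 := by omega
    rw [this]; ring
  · rw [pyOuterLoop, if_neg h]
    have : max (num_threads - tid) 0 = 0 := by omega
    rw [this]; ring
termination_by (num_threads - tid).toNat
decreasing_by omega

-- ===== VERDICT (by name: the statement is the Claim_ definition above) =====
theorem simulate_counter_spec : Claim_equal_simulate_counter := by
  intro nt ip _
  unfold Spec_simulate_counter simulate_counter simulate_counter_alt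
  rw [pyOuterLoop_eq]
  split_ifs with h
  · have h1 : max (nt - 0) 0 = nt := by omega
    have h2 : max ip 0 = ip := by omega
    rw [h1, h2]; ring
  · rcases not_and_or.mp h with h' | h'
    · have : max (nt - 0) 0 = 0 := by omega
      rw [this]; ring
    · have : max ip 0 = 0 := by omega
      rw [this]; ring
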